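-- pv_equiv track=rewrite | github.com/CptEnder/Python | My Projects/Nonograms/UsefulMethods.py | pushOver
-- ===== SOURCE A (Python) =====
-- def pushOver(ls: list):
--     new_ls = []
--     lastOne = len(ls) - ls[::-1].index(1) - 1
--     if lastOne != len(ls) - 1:
--         count = len(ls) - lastOne - 1
--         maxC = count
--         while count:
--             new_ls.append([])
--             new_ls[-1].extend([0] * count)
--             new_ls[-1].extend(ls[0:lastOne + 1])
--             new_ls[-1].extend([0] * (maxC - count))
--             count -= 1
--
--     return new_ls
-- ===== SOURCE B (Python) =====
-- def pushOver(ls: list):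
--     lastOne = len(ls) - ls[::-1].index(1) - 1
--     maxC = len(ls) - lastOne - 1
--     if maxC == 0:
--         return []
--     pad = [0] * maxC + ls[0:lastOne + 1] + [0] * maxC
--     n = len(ls)
--     return [pad[i:i + n] for i in range(maxC)]
-- ===== Notes on version B (the rewrite author's own statement) =====
-- stated objective: alternative
-- what changed: Instead of concatenating fresh zero-blocks and the prefix for every row, B builds one zero-padded buffer [0]*maxC + ls[:lastOne+1] + [0]*maxC once and returns the maxC sliding windows pad[i:i+len(ls)] of it.
-- outside the precondition, e.g. on pushOver([0]): A raises ValueError, B raises ValueError; on pushOver([]): A raises ValueError, B raises ValueError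
import Mathlib
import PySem

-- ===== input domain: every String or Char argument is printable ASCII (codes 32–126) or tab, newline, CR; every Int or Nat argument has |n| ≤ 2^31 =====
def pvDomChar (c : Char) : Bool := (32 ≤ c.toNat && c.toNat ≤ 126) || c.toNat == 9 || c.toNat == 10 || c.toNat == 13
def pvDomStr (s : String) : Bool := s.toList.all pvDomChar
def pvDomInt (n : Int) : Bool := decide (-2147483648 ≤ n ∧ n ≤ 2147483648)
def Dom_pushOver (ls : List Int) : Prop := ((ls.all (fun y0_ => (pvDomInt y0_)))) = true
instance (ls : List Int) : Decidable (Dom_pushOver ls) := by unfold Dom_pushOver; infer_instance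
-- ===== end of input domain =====

-- B replaces A's per-row zero-block/prefix concatenation by one padded buffer sliced into sliding windows (alternative decomposition, same cost).

-- ===== PORT A =====
-- while count: append [0]*count ++ ls[0:lastOne+1] ++ [0]*(maxC-count); count -= 1
def pushOverLoop (ls : List Int) (lastOne : Int) (maxC : Nat) : Nat → List (List Int) → List (List Int)
  | 0, acc => acc
  | Nat.succ c, acc =>
      pushOverLoop ls lastOne maxC c
        (acc ++ [List.replicate (c + 1) (0 : Int)
                 ++ PySem.List.slice ls (some 0) (some (lastOne + 1))
                 ++ List.replicate (maxC - (c + 1)) (0 : Int)])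

def pushOver (ls : List Int) : List (List Int) :=
  match PySem.List.index? ls.reverse 1 with
  | none => []   -- Python raises ValueError here (1 not in ls); excluded by Pre_
  | some i =>
    let lastOne : Int := (ls.length : Int) - (i : Int) - 1
    if lastOne ≠ (ls.length : Int) - 1 then
      let count : Nat := ls.length - 1 - lastOne.toNat
      pushOverLoop ls lastOne count count []
    else []

-- ===== PORT B =====
def pushOver_alt (ls : List Int) : List (List Int) :=
  match PySem.List.index? ls.reverse 1 with
  | none => []   -- Python raises ValueError here (1 not in ls); excluded by Pre_
  | some i =>
    let lastOne : Int := (ls.length : Int) - (i : Int) - 1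
    let maxC : Nat := ls.length - 1 - lastOne.toNat
    if maxC = 0 then []
    else
      let pad := List.replicate maxC (0 : Int)
                 ++ PySem.List.slice ls (some 0) (some (lastOne + 1))
                 ++ List.replicate maxC (0 : Int)
      (List.range maxC).map (fun (j : Nat) =>
        PySem.List.slice pad (some (j : Int)) (some ((j : Int) + (ls.length : Int))))

-- ===== PRECONDITION & SPEC =====
-- Pre_ excludes exactly the inputs where A raises ValueError: lists not containing 1 (so also the empty list).
def Pre_pushOver (ls : List Int) : Prop := (1 : Int) ∈ ls
instance (ls : List Int) : Decidable (Pre_pushOver ls) := by unfold Pre_pushOver; infer_instance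
def pvWitness_pushOver : List Int := [1, 0]
def Spec_pushOver (ls : List Int) (out : List (List Int)) : Prop := out = pushOver_alt ls
instance (ls : List Int) (out : List (List Int)) : Decidable (Spec_pushOver ls out) := by unfold Spec_pushOver; infer_instance

-- ===== CLAIM (what is proved, stated in full; the proofs are below) =====
def Claim_equal_pushOver : Prop := ∀ (ls : List Int), Dom_pushOver ls → Pre_pushOver ls → Spec_pushOver ls (pushOver ls)

-- ===== LEMMAS AND PROOFS =====

-- A's while-loop appends the rows for count = c, c-1, …, 1 in order.
lemma pushOverLoop_eq (ls : List Int) (lastOne : Int) (maxC : Nat) :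
    ∀ (c : Nat) (acc : List (List Int)),
      pushOverLoop ls lastOne maxC c acc =
        acc ++ (List.range c).map (fun k =>
          List.replicate (c - k) (0 : Int)
          ++ PySem.List.slice ls (some 0) (some (lastOne + 1))
          ++ List.replicate (maxC - (c - k)) (0 : Int)) := by
  intro c
  induction c with
  | zero => intro acc; simp [pushOverLoop]
  | succ c ih =>
      intro acc
      rw [pushOverLoop, ih, List.range_succ_eq_map]
      simp [List.append_assoc]

-- (proof of the verdict theorem)
-- the k-th sliding window of the padded buffer is the row with i-k leading and k trailing zeros
lemma pushOver_window (P : List Int) (i k L : Nat) (hk : k < i) (hP : P.length = L - i) (hiL : i < L) :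
    ((List.replicate i (0:Int) ++ P ++ List.replicate i 0).drop k).take L
      = List.replicate (i - k) 0 ++ P ++ List.replicate (i - (i - k)) 0 := by
  have hki : k ≤ i := hk.le
  simp only [List.drop_append, List.take_append, List.drop_replicate, List.take_replicate,
    List.length_append, List.length_replicate, hP, Nat.sub_eq_zero_of_le hki, List.drop_zero]
  have h1 : min L (i - k) = i - k := by omega
  have h3 : min (L - (i - k + (L - i))) (i - (k - (i + (L - i)))) = i - (i - k) := by omega
  rw [h1, h3, List.take_of_length_le (by omega)]

-- ===== VERDICT (by name: the statement is the Claim_ definition above) =====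
theorem pushOver_spec : Claim_equal_pushOver := by
  intro ls _ hpre
  unfold Spec_pushOver pushOver pushOver_alt
  have hmem : (1 : Int) ∈ ls.reverse := by simpa using hpre
  obtain ⟨i, hi⟩ := Option.isSome_iff_exists.mp
    ((PySem.List.index?_isSome_iff (xs := ls.reverse) (v := 1)).mpr hmem)
  rw [hi]
  dsimp only
  obtain ⟨hilt, -, -⟩ := PySem.List.getElem_of_index?_eq_some hi
  rw [List.length_reverse] at hilt
  set L := ls.length with hL
  have hmaxC : L - 1 - ((L : Int) - (i : Int) - 1).toNat = i := by omega
  rw [hmaxC]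
  by_cases hiz : i = 0
  · subst hiz
    simp
  · have hne : ((L : Int) - (i : Int) - 1) ≠ (L : Int) - 1 := by omega
    rw [if_pos hne, if_neg hiz]
    rw [pushOverLoop_eq]
    have hslice : PySem.List.slice ls (some 0) (some (((L : Int) - (i : Int) - 1) + 1)) =
        ls.take (L - i) := by
      have : ((L : Int) - (i : Int) - 1) + 1 = ((L - i : Nat) : Int) := by omega
      rw [this]
      simp [PySem.List.slice_to_natCast]
    have hPlen : (ls.take (L - i)).length = L - i := by
      simp; omega
    simp only [List.nil_append]
    apply List.map_congr_left
    intro k hk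
    have hki : k < i := List.mem_range.mp hk
    rw [hslice, PySem.List.slice_natCast_add,
        pushOver_window (ls.take (L - i)) i k L hki hPlen hilt]
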